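-- pv_equiv track=rewrite | github.com/kylecumming/2134L1 | incremental/splat.py | scanner
-- ===== SOURCE A (Python) =====
-- singletons = { '!', '&', '|', '*', '+', '-', '/', ',',
--                '(', ')', '[', ']', '{', '}', '=', '<', '>', '#' }
--
-- class Str(str):
--   pass
--
-- class ScanError(Exception):
--   def __init__(self, msg, tok):
--     self.msg = msg
--     self.tok = tok
--
--   def __str__(self):
--     return repr(self.msg)
--
-- def reStr(s, t):
--   r = Str(s)
--   r.line = t.line
--   r.col = t.col
--   return r
--
-- def char_generator(program):
--   line = 1
--   col = 0
--   for b in program: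
--     c = Str(b);
--     col = col + 1
--     if c == '\n':
--       line = line + 1
--       col = 0
--
--     c.line = line
--     c.col = col
--     yield c;
--
--   c = Str("")
--   c.line = line
--   c.col = col
--   yield c
--
-- def scan(stream, acc, cond):
--   c = next(stream)
--   while cond(acc, c):
--     acc = acc + c
--     c = next(stream)
--   return acc, c
--
-- def scanner(program):
--   stream = char_generator(program)
--   numtest = lambda acc, c: c.isdigit()
--   symtest = lambda acc, c: c.isalpha() or c.isdigit() or c == '_'
--   strtest = lambda acc, c: c != '"' and c != ""
--
--   c = next(stream)
--   while c != "":
--     first = c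
--     acc = c
--
--     if c.isspace():
--       c = next(stream)
--       continue
--     elif c in singletons:
--       c = next(stream)
--     elif c == '"':
--       acc, c = scan(stream, acc, strtest)
--       if c != "":
--         acc = acc + c
--         c = next(stream)
--     elif c.isdigit():
--       acc, c = scan(stream, acc, numtest)
--     elif c.isalpha() or c == '_':
--       acc, c = scan(stream, acc, symtest)
--     else:
--       raise ScanError('Unexpected character', c)
--
--     yield reStr(acc, first)
--
--   yield c
-- ===== SOURCE B (Python) =====
-- # B: single index-based scanner over the string (no generator/scan-helper machinery);
-- # precomputes a (line,col) table once and slices tokens directly.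
-- singletons = { '!', '&', '|', '*', '+', '-', '/', ',',
--                '(', ')', '[', ']', '{', '}', '=', '<', '>', '#' }
--
-- class Str(str):
--   pass
--
-- class ScanError(Exception):
--   def __init__(self, msg, tok):
--     self.msg = msg
--     self.tok = tok
--
--   def __str__(self):
--     return repr(self.msg)
--
-- def scanner(program):
--   n = len(program)
--   pos = []
--   line, col = 1, 0
--   for ch in program:
--     col += 1
--     if ch == '\n':
--       line, col = line + 1, 0
--     pos.append((line, col))
--   pos.append((line, col))  # EOF position
--
--   i = 0
--   while i < n:
--     ch = program[i]
--     if ch.isspace():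
--       i += 1
--       continue
--     start = i
--     if ch in singletons:
--       i += 1
--     elif ch == '"':
--       i += 1
--       while i < n and program[i] != '"':
--         i += 1
--       if i < n:
--         i += 1
--     elif ch.isdigit():
--       while i < n and program[i].isdigit():
--         i += 1
--     elif ch.isalpha() or ch == '_':
--       while i < n and (program[i].isalnum() or program[i] == '_'):
--         i += 1
--     else:
--       bad = Str(ch)
--       bad.line, bad.col = pos[i]
--       raise ScanError('Unexpected character', bad)
--     t = Str(program[start:i])
--     t.line, t.col = pos[start]
--     yield t
--   t = Str("")
--   t.line, t.col = pos[n]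
--   yield t
-- ===== Notes on version B (the rewrite author's own statement) =====
-- stated objective: faster
-- what changed: Replaced the char_generator + generic cond-driven scan helper + dispatch loop with a single index-based scanner: a precomputed (line,col) table and inner while-loops over an integer index that slice each token directly out of the string, instead of wrapping every character in a Str object and growing tokens by repeated concatenation.
import Mathlib
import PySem

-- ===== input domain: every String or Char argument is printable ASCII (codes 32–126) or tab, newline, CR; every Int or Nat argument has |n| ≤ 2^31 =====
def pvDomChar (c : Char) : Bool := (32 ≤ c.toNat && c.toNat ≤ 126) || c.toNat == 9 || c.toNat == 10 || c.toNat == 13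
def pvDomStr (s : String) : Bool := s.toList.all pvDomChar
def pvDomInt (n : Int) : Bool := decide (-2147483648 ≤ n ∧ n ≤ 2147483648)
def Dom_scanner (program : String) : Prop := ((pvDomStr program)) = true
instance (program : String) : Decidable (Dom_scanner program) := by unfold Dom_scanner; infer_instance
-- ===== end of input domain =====

-- B replaces A's generator + cond-driven scan helper with one index-based scanner; equivalence is on
-- the yielded token strings (the Python Str line/col attributes are not part of the str value).

-- ===== PORT A =====
-- the singletons set
def pvSingletons : List Char :=
  ['!', '&', '|', '*', '+', '-', '/', ',', '(', ')', '[', ']', '{', '}', '=', '<', '>', '#']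

-- scan(stream, acc, cond): the stream is the remaining char list; the "" sentinel is the end of
-- the list, where every cond used by A is False (isdigit/isalpha of "" are False, and strtest
-- carries 'c != ""' explicitly), so the [] case returns (acc, c="") = (acc, none, []).
def pvScan (cond : List Char → Char → Bool) (acc : List Char) :
    List Char → List Char × Option Char × List Char
  | [] => (acc, none, [])
  | c :: rest => if cond acc c then pvScan cond (acc ++ [c]) rest else (acc, some c, rest)

theorem pvScan_measure (cond : List Char → Char → Bool) (acc s : List Char) :
    (pvScan cond acc s).2.2.length + (if (pvScan cond acc s).2.1.isSome then 1 else 0)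
      ≤ s.length := by
  induction s generalizing acc with
  | nil => simp [pvScan]
  | cons c rest ih =>
    simp only [pvScan]
    split
    · exact le_trans (ih _) (by simp)
    · simp

-- the while-loop of scanner: c is the current char ("" = none), the rest of the stream follows
def pvLoopA (c : Option Char) (rest : List Char) : List (List Char) :=
  match c with
  | none => [[]]                                   -- while exits; final 'yield c' with c = ""
  | some ch =>
    if PySem.Chars.isspace ch then
      pvLoopA rest.head? rest.tail
    else if ch ∈ pvSingletons then
      [ch] :: pvLoopA rest.head? rest.tail
    else if ch = '"' then
      let r := pvScan (fun _ c => c ≠ '"') [ch] rest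
      match r.2.1 with                             -- if c != "": acc = acc + c; c = next(stream)
      | some c2 => (r.1 ++ [c2]) :: pvLoopA r.2.2.head? r.2.2.tail
      | none => r.1 :: pvLoopA none r.2.2
    else if PySem.Chars.isdigit ch then
      let r := pvScan (fun _ c => PySem.Chars.isdigit c) [ch] rest
      r.1 :: pvLoopA r.2.1 r.2.2
    else if PySem.Chars.isalpha ch || ch = '_' then
      let r := pvScan (fun _ c => PySem.Chars.isalpha c || PySem.Chars.isdigit c || c = '_')
        [ch] rest
      r.1 :: pvLoopA r.2.1 r.2.2
    else []                                        -- raise ScanError (excluded by Pre_)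
termination_by rest.length + (if c.isSome then 1 else 0)
decreasing_by
  · rcases rest with _ | ⟨x, xs⟩ <;> simp
  · rcases rest with _ | ⟨x, xs⟩
    · simp
    · simp
  · have := pvScan_measure (fun _ c => c ≠ '"') [ch] rest
    rcases hr : (pvScan (fun _ c => c ≠ '"') [ch] rest).2.2 with _ | ⟨x, xs⟩ <;>
      rw [hr] at this <;> simp at this ⊢ <;> omega
  · have := pvScan_measure (fun _ c => c ≠ '"') [ch] rest
    simp at this ⊢; omega
  · have := pvScan_measure (fun _ c => PySem.Chars.isdigit c) [ch] rest
    rcases hr : (pvScan (fun _ c => PySem.Chars.isdigit c) [ch] rest).2.1 <;>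
      rw [hr] at this <;> simp at this ⊢ <;> omega
  · have := pvScan_measure
      (fun _ c => PySem.Chars.isalpha c || PySem.Chars.isdigit c || c = '_') [ch] rest
    rcases hr : (pvScan
        (fun _ c => PySem.Chars.isalpha c || PySem.Chars.isdigit c || c = '_') [ch] rest).2.1 <;>
      rw [hr] at this <;> simp at this ⊢ <;> omega

def scanner (program : String) : List String :=
  (pvLoopA program.toList.head? program.toList.tail).map String.ofList

-- ===== PORT B =====
-- while i < n and program[i].isdigit(): i += 1
def pvRunDigits (s : List Char) (i : Nat) : Nat :=
  if h : i < s.length then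
    if PySem.Chars.isdigit s[i] then pvRunDigits s (i + 1) else i
  else i
termination_by s.length - i

-- while i < n and program[i] != '"': i += 1
def pvRunStr (s : List Char) (i : Nat) : Nat :=
  if h : i < s.length then
    if s[i] ≠ '"' then pvRunStr s (i + 1) else i
  else i
termination_by s.length - i

-- while i < n and (program[i].isalnum() or program[i] == '_'): i += 1
def pvRunSym (s : List Char) (i : Nat) : Nat :=
  if h : i < s.length then
    if PySem.Chars.isalnum s[i] || s[i] = '_' then pvRunSym s (i + 1) else i
  else i
termination_by s.length - i

theorem pvRunDigits_le (s : List Char) (i : Nat) : i ≤ pvRunDigits s i := by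
  fun_induction pvRunDigits s i <;> omega

theorem pvRunStr_le (s : List Char) (i : Nat) : i ≤ pvRunStr s i := by
  fun_induction pvRunStr s i <;> omega

theorem pvRunSym_le (s : List Char) (i : Nat) : i ≤ pvRunSym s i := by
  fun_induction pvRunSym s i <;> omega

-- the main 'while i < n' loop; tokens are slices program[start:i]
def pvLoopB (s : List Char) (i : Nat) : List (List Char) :=
  if h : i < s.length then
    let ch := s[i]
    if PySem.Chars.isspace ch then
      pvLoopB s (i + 1)
    else if ch ∈ pvSingletons then
      ((s.drop i).take 1) :: pvLoopB s (i + 1)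
    else if ch = '"' then
      let k := pvRunStr s (i + 1)
      let j := if k < s.length then k + 1 else k
      ((s.drop i).take (j - i)) :: pvLoopB s j
    else if PySem.Chars.isdigit ch then
      let j := pvRunDigits s (i + 1)
      ((s.drop i).take (j - i)) :: pvLoopB s j
    else if PySem.Chars.isalpha ch || ch = '_' then
      let j := pvRunSym s (i + 1)
      ((s.drop i).take (j - i)) :: pvLoopB s j
    else []                                        -- raise ScanError (excluded by Pre_)
  else [[]]                                        -- final 'yield Str("")'
termination_by s.length - i
decreasing_by
  · omega
  · omega
  · have := pvRunStr_le s (i + 1); split <;> omega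
  · have := pvRunDigits_le s (i + 1); omega
  · have := pvRunSym_le s (i + 1); omega

def scanner_alt (program : String) : List String :=
  (pvLoopB program.toList 0).map String.ofList

-- ===== PRECONDITION & SPEC =====
-- Pre_ excludes exactly the programs on which A raises ScanError: a character outside any
-- string literal that is not whitespace, a singleton, a digit, a letter or '_'.
def pvAllowed (c : Char) : Bool :=
  PySem.Chars.isspace c || c ∈ pvSingletons || PySem.Chars.isdigit c ||
    PySem.Chars.isalpha c || c = '_'

-- two-state check: inStr tracks whether we are inside a "…" literal
def pvOk (inStr : Bool) : List Char → Bool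
  | [] => true
  | c :: r =>
    if inStr then pvOk (c ≠ '"') r
    else if c = '"' then pvOk true r
    else pvAllowed c && pvOk false r

def Pre_scanner (program : String) : Prop := pvOk false program.toList = true
instance (program : String) : Decidable (Pre_scanner program) := by
  unfold Pre_scanner; infer_instance

def pvWitness_scanner : String := "x1 = \"a.b\" + (y_2*3)\n"

def Spec_scanner (program : String) (out : List String) : Prop := out = scanner_alt program
instance (program : String) (out : List String) : Decidable (Spec_scanner program out) := by
  unfold Spec_scanner; infer_instance

-- ===== CLAIM (what is proved, stated in full; the proofs are below) =====
def Claim_equal_scanner : Prop :=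
  ∀ (program : String), Dom_scanner program → Pre_scanner program →
    Spec_scanner program (scanner program)

-- ===== LEMMAS AND PROOFS =====

-- pvScan in terms of takeWhile/dropWhile of the remaining stream
theorem pvScan_eq (cond : Char → Bool) (acc s : List Char) :
    pvScan (fun _ c => cond c) acc s =
      (acc ++ s.takeWhile cond, (s.dropWhile cond).head?, (s.dropWhile cond).tail) := by
  induction s generalizing acc with
  | nil => simp [pvScan]
  | cons c rest ih =>
    simp only [pvScan, List.takeWhile, List.dropWhile]
    by_cases h : cond c = true
    · simp [h, ih]
    · simp [h]

-- the B-side while loops in terms of takeWhile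
theorem pvRunDigits_eq (s : List Char) (i : Nat) :
    pvRunDigits s i = i + ((s.drop i).takeWhile PySem.Chars.isdigit).length := by
  fun_induction pvRunDigits s i with
  | case1 i h hd ih =>
    rw [List.drop_eq_getElem_cons h, List.takeWhile_cons, if_pos hd]
    simp only [List.length_cons]
    omega
  | case2 i h hd =>
    rw [List.drop_eq_getElem_cons h, List.takeWhile_cons, if_neg hd]; simp
  | case3 i h =>
    rw [List.drop_eq_nil_of_le (by omega)]
    simp

theorem pvRunStr_eq (s : List Char) (i : Nat) :
    pvRunStr s i = i + ((s.drop i).takeWhile (· ≠ '"')).length := by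
  fun_induction pvRunStr s i with
  | case1 i h hd ih =>
    rw [List.drop_eq_getElem_cons h, List.takeWhile_cons, if_pos (by simpa using hd)]
    simp only [List.length_cons]
    omega
  | case2 i h hd =>
    rw [List.drop_eq_getElem_cons h, List.takeWhile_cons, if_neg (by simpa using hd)]; simp
  | case3 i h =>
    rw [List.drop_eq_nil_of_le (by omega)]
    simp

theorem pvRunSym_eq (s : List Char) (i : Nat) :
    pvRunSym s i = i + ((s.drop i).takeWhile
      (fun c => PySem.Chars.isalnum c || c = '_')).length := by
  fun_induction pvRunSym s i with
  | case1 i h hd ih =>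
    rw [List.drop_eq_getElem_cons h, List.takeWhile_cons, if_pos hd]
    simp only [List.length_cons]
    omega
  | case2 i h hd =>
    rw [List.drop_eq_getElem_cons h, List.takeWhile_cons, if_neg hd]; simp
  | case3 i h =>
    rw [List.drop_eq_nil_of_le (by omega)]
    simp

-- pvOk ignores a prefix of allowed non-quote chars (outside a string)
theorem pvOk_append_allowed (l1 l2 : List Char)
    (h : ∀ c ∈ l1, c ≠ '"' ∧ pvAllowed c = true) :
    pvOk false (l1 ++ l2) = pvOk false l2 := by
  induction l1 with
  | nil => rfl
  | cons c r ih =>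
    have hc := h c (by simp)
    show (if false then _
        else if c = '"' then pvOk true (r ++ l2)
        else pvAllowed c && pvOk false (r ++ l2)) = _
    rw [if_neg (by simp), if_neg hc.1, hc.2, Bool.true_and]
    exact ih fun c hc => h c (by simp [hc])

-- pvOk inside a string: skip the string body and its closing quote
theorem pvOk_string (l1 l2 : List Char) (h : ∀ c ∈ l1, c ≠ '"') :
    pvOk true (l1 ++ '"' :: l2) = pvOk false l2 := by
  induction l1 with
  | nil => simp [pvOk]
  | cons c r ih =>
    have hc := h c (by simp)
    show pvOk (c ≠ '"') (r ++ '"' :: l2) = _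
    rw [show (decide (c ≠ '"')) = true by simp [hc]]
    exact ih fun c hc => h c (by simp [hc])

-- a char's predicates agree with its pvAllowed classification
theorem pvIsalnum_eq (c : Char) :
    (PySem.Chars.isalnum c || c = '_') = (PySem.Chars.isalpha c || PySem.Chars.isdigit c || c = '_') := by
  by_cases h : c = '_' <;>
    simp [PySem.Chars.isalnum, PySem.Chars.isalpha, PySem.Chars.isdigit,
      PySem.Chars.isupper, PySem.Chars.islower, h]

-- main invariant: on the valid remainder, the two loops produce the same tokens
theorem pvLoop_eq (s : List Char) (i : Nat) (hi : i ≤ s.length)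
    (hok : pvOk false (s.drop i) = true) :
    pvLoopA (s.drop i).head? (s.drop i).tail = pvLoopB s i := by
  by_cases h : i < s.length
  · have hdrop : s.drop i = s[i] :: s.drop (i + 1) := List.drop_eq_getElem_cons h
    set ch := s[i] with hch
    rw [hdrop]
    simp only [List.head?_cons, List.tail_cons]
    rw [pvLoopA, pvLoopB]
    simp only [dif_pos h]
    have hrec : ∀ j, i < j → j ≤ s.length → pvOk false (s.drop j) = true →
        pvLoopA (s.drop j).head? (s.drop j).tail = pvLoopB s j := by
      intro j hij hj hokj
      exact pvLoop_eq s j hj hokj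
    by_cases hsp : PySem.Chars.isspace ch = true
    · have hne : ch ≠ '"' := by
        intro hq; rw [hq] at hsp; simp [PySem.Chars.isspace] at hsp
      rw [if_pos hsp, if_pos hsp]
      have hok' : pvOk false (s.drop (i + 1)) = true := by
        rw [hdrop] at hok
        simpa [pvOk, if_neg (by simp : ¬ (false = true)), if_neg hne,
          pvAllowed, hsp] using hok
      exact hrec (i + 1) (by omega) (by omega) hok'
    · rw [if_neg hsp, if_neg hsp]
      by_cases hsg : ch ∈ pvSingletons
      · have hne : ch ≠ '"' := by
          intro hq; rw [hq] at hsg; simp [pvSingletons] at hsg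
        rw [if_pos hsg, if_pos hsg]
        have hok' : pvOk false (s.drop (i + 1)) = true := by
          rw [hdrop] at hok
          simpa [pvOk, if_neg hne, pvAllowed, hsg] using hok
        rw [hdrop, List.take_one, List.head?_cons, Option.toList_some]
        exact congrArg _ (hrec (i + 1) (by omega) (by omega) hok')
      · rw [if_neg hsg, if_neg hsg]
        by_cases hq : ch = '"'
        · rw [if_pos hq, if_pos hq]
          -- string token
          set rest := s.drop (i + 1) with hrest
          set tw := rest.takeWhile (· ≠ '"') with htw
          set dw := rest.dropWhile (· ≠ '"') with hdw
          have hsplit : rest = tw ++ dw := (List.takeWhile_append_dropWhile).symm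
          have htwne : ∀ c ∈ tw, c ≠ '"' := by
            intro c hc
            have := List.mem_takeWhile_imp (htw ▸ hc)
            simpa using this
          have hkeq : pvRunStr s (i + 1) = i + 1 + tw.length := pvRunStr_eq s (i + 1)
          have hscan := pvScan_eq (fun c => decide (c ≠ '"')) [ch] rest
          have hscan' : pvScan (fun _ c => c ≠ '"') [ch] rest =
              ([ch] ++ tw, dw.head?, dw.tail) := by
            simpa [htw, hdw] using hscan
          rw [hscan']
          have hoks : pvOk true rest = true := by
            rw [hdrop] at hok
            simpa [pvOk, hq] using hok
          have hdroplen : rest.length = s.length - (i + 1) := by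
            simp [hrest]
          cases hdweq : dw with
          | nil =>
            -- unterminated string: token is the whole rest, then EOF
            have hreq : rest = tw := by rw [hsplit, hdweq, List.append_nil]
            have hk : pvRunStr s (i + 1) = s.length := by
              rw [hkeq]
              have : rest.length = tw.length := by rw [hreq]
              omega
            simp only [List.head?_nil, List.tail_nil]
            rw [hk, if_neg (by omega : ¬ s.length < s.length)]
            have hjs : (s.drop i).take (s.length - i) = ch :: tw := by
              rw [hdrop, ← hreq]
              have : s.length - i = (s.drop (i+1)).length + 1 := by
                simp [hrest] at hdroplen ⊢; omega
              rw [this, List.take_succ_cons, ← hrest, List.take_of_length_le (le_refl _)]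
            rw [hjs]
            show ([ch] ++ tw) :: pvLoopA none [] = _
            rw [show pvLoopB s s.length = [[]] by rw [pvLoopB]; simp]
            simp [pvLoopA]
          | cons d dw' =>
            have hd : d = '"' := by
              have hdc : rest.dropWhile (· ≠ '"') = d :: dw' := by rw [← hdw, hdweq]
              have := List.head?_dropWhile_not (fun x => decide (x ≠ '"')) rest
              rw [hdc] at this
              simpa using this
            have hk : pvRunStr s (i + 1) < s.length := by
              have h1 : rest.length = tw.length + (d :: dw').length := by
                rw [hsplit, hdweq]; simp
              simp at h1
              omega
            simp only [List.head?_cons, List.tail_cons]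
            rw [if_pos hk, hkeq]
            have hj : i + 1 + tw.length + 1 - i = tw.length + 2 := by omega
            rw [hj]
            have htake : (s.drop i).take (tw.length + 2) = ch :: (tw ++ [d]) := by
              rw [hdrop, List.take_succ_cons, hsplit, hdweq]
              rw [show tw ++ d :: dw' = (tw ++ [d]) ++ dw' by simp]
              rw [List.take_append_of_le_length (by simp)]
              rw [List.take_of_length_le (by simp)]
            rw [htake]
            have hdrop2 : s.drop (i + 1 + tw.length + 1) = dw' := by
              rw [show i + 1 + tw.length + 1 = (i + 1) + (tw.length + 1) by omega,
                ← List.drop_drop, ← hrest, hsplit, hdweq]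
              simp
            have hok' : pvOk false dw' = true := by
              have := pvOk_string tw dw' htwne
              rw [← this, ← hd, ← hdweq, ← hsplit]
              exact hoks
            have hloop := hrec (i + 1 + tw.length + 1) (by omega) (by omega) (by rw [hdrop2]; exact hok')
            rw [hdrop2] at hloop
            rw [hloop]
            simp
        · rw [if_neg hq, if_neg hq]
          have hallow : pvAllowed ch = true := by
            rw [hdrop] at hok
            simp only [pvOk, if_neg (by simp : ¬ (false = true)), if_neg hq,
              Bool.and_eq_true] at hok
            exact hok.1
          have hokrest : pvOk false (s.drop (i + 1)) = true := by
            rw [hdrop] at hok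
            simpa [pvOk, if_neg hq, hallow] using hok
          by_cases hdg : PySem.Chars.isdigit ch = true
          · rw [if_pos hdg, if_pos hdg]
            set rest := s.drop (i + 1) with hrest
            set tw := rest.takeWhile PySem.Chars.isdigit with htw
            set dw := rest.dropWhile PySem.Chars.isdigit with hdw
            have hsplit : rest = tw ++ dw := (List.takeWhile_append_dropWhile).symm
            have hscan' : pvScan (fun _ c => PySem.Chars.isdigit c) [ch] rest =
                ([ch] ++ tw, dw.head?, dw.tail) := by
              simpa [htw, hdw] using pvScan_eq PySem.Chars.isdigit [ch] rest
            rw [hscan', pvRunDigits_eq, ← hrest, ← htw]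
            have hj : i + 1 + tw.length - i = tw.length + 1 := by omega
            rw [hj]
            have htake : (s.drop i).take (tw.length + 1) = ch :: tw := by
              rw [hdrop, List.take_succ_cons, hsplit,
                List.take_append_of_le_length (le_refl _), List.take_of_length_le (le_refl _)]
            rw [htake]
            have hdrop2 : s.drop (i + 1 + tw.length) = dw := by
              rw [show i + 1 + tw.length = (i + 1) + tw.length by omega,
                ← List.drop_drop, ← hrest, hsplit,
                List.drop_append_of_le_length (le_refl _)]
              simp
            have htwlen : i + 1 + tw.length ≤ s.length := by
              have h1 : tw.length ≤ rest.length := htw ▸ (List.takeWhile_sublist _).length_le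
              have : rest.length = s.length - (i + 1) := by simp [hrest]
              omega
            have hok' : pvOk false dw = true := by
              rw [← pvOk_append_allowed tw dw ?_, ← hsplit]
              · exact hokrest
              · intro c hc
                have hcd := List.mem_takeWhile_imp (htw ▸ hc)
                constructor
                · intro hcq; rw [hcq] at hcd; simp [PySem.Chars.isdigit] at hcd
                · simp [pvAllowed, hcd]
            have := hrec (i + 1 + tw.length) (by omega) htwlen (by rw [hdrop2]; exact hok')
            rw [hdrop2] at this
            rw [this]
            simp
          · rw [if_neg hdg, if_neg hdg]
            by_cases hal : (PySem.Chars.isalpha ch || ch = '_') = true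
            · rw [if_pos hal, if_pos hal]
              set rest := s.drop (i + 1) with hrest
              set p := fun c => PySem.Chars.isalpha c || PySem.Chars.isdigit c || c = '_' with hp
              set tw := rest.takeWhile p with htw
              set dw := rest.dropWhile p with hdw
              have hsplit : rest = tw ++ dw := (List.takeWhile_append_dropWhile).symm
              have hscan' : pvScan (fun _ c => p c) [ch] rest =
                  ([ch] ++ tw, dw.head?, dw.tail) := by
                simpa [htw, hdw] using pvScan_eq p [ch] rest
              rw [hscan', pvRunSym_eq, ← hrest]
              have hpeq : rest.takeWhile (fun c => PySem.Chars.isalnum c || c = '_') = tw := by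
                have hfun : (fun c => PySem.Chars.isalnum c || decide (c = '_')) = p := by
                  funext c
                  rw [hp]
                  exact pvIsalnum_eq c
                rw [hfun, ← htw]
              rw [hpeq]
              have hj : i + 1 + tw.length - i = tw.length + 1 := by omega
              rw [hj]
              have htake : (s.drop i).take (tw.length + 1) = ch :: tw := by
                rw [hdrop, List.take_succ_cons, hsplit,
                  List.take_append_of_le_length (le_refl _), List.take_of_length_le (le_refl _)]
              rw [htake]
              have hdrop2 : s.drop (i + 1 + tw.length) = dw := by
                rw [show i + 1 + tw.length = (i + 1) + tw.length by omega,
                  ← List.drop_drop, ← hrest, hsplit,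
                  List.drop_append_of_le_length (le_refl _)]
                simp
              have htwlen : i + 1 + tw.length ≤ s.length := by
                have h1 : tw.length ≤ rest.length := htw ▸ (List.takeWhile_sublist _).length_le
                have : rest.length = s.length - (i + 1) := by simp [hrest]
                omega
              have hok' : pvOk false dw = true := by
                rw [← pvOk_append_allowed tw dw ?_, ← hsplit]
                · exact hokrest
                · intro c hc
                  have hcd := List.mem_takeWhile_imp (htw ▸ hc)
                  rw [hp] at hcd; simp only [Bool.or_eq_true] at hcd
                  constructor
                  · intro hcq
                    rw [hcq] at hcd
                    rcases hcd with (h1 | h1) | h1 <;>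
                      simp [PySem.Chars.isalpha, PySem.Chars.isupper, PySem.Chars.islower,
                        PySem.Chars.isdigit] at h1
                  · simp only [pvAllowed, Bool.or_eq_true]
                    rcases hcd with (h1 | h1) | h1
                    · tauto
                    · tauto
                    · tauto
              have := hrec (i + 1 + tw.length) (by omega) htwlen (by rw [hdrop2]; exact hok')
              rw [hdrop2] at this
              rw [this]
              simp
            · -- contradiction: pvAllowed ch but no branch fired
              exfalso
              simp only [pvAllowed, Bool.or_eq_true] at hallow
              simp only [Bool.or_eq_true] at hal
              rcases hallow with ((((h1 | h1) | h1) | h1) | h1)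
              · exact hsp h1
              · exact hsg (by simpa using h1)
              · exact hdg h1
              · exact hal (Or.inl h1)
              · exact hal (Or.inr h1)
  · have : s.drop i = [] := List.drop_eq_nil_of_le (by omega)
    rw [this, pvLoopB]
    simp [pvLoopA, h]
termination_by s.length - i
decreasing_by all_goals omega

-- ===== VERDICT (by name: the statement is the Claim_ definition above) =====
theorem scanner_spec : Claim_equal_scanner := by
  intro program _ hpre
  unfold Spec_scanner scanner scanner_alt
  have := pvLoop_eq program.toList 0 (by omega) (by simpa using hpre)
  rw [← this]
  simp
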